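-- pv_equiv track=rewrite | github.com/endomorphosis/ipfs_datasets_py | ipfs_datasets_py/processors/legal_scrapers/legal_report_generator.py | _generate_developments_section
-- ===== SOURCE A (Python) =====
-- from typing import List, Dict, Optional, Any, Callable
--
-- def _generate_developments_section(results: List[Dict[str, Any]]) -> str:
--     """Generate recent developments section."""
--     lines = [
--         "### Recent Regulatory Developments",
--         "",
--         "The following recent developments have been identified:",
--         ""
--     ]
--
--     # Group by domain
--     by_domain = {}
--     for result in results:
--         domain = result.get("domain", "other")
--         if domain not in by_domain:
--             by_domain[domain] = []
--         by_domain[domain].append(result)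
--
--     for domain, domain_results in sorted(by_domain.items())[:5]:
--         lines.append(f"**{domain}**")
--         for result in domain_results[:3]:
--             lines.append(f"- {result.get('title', 'Untitled')}")
--         lines.append("")
--
--     return "\n".join(lines)
-- ===== SOURCE B (Python) =====
-- def _generate_developments_section(results):
--     """Generate recent developments section."""
--     header = [
--         "### Recent Regulatory Developments",
--         "",
--         "The following recent developments have been identified:",
--         ""
--     ]
--     # Distinct domains, sorted; per-domain membership by filtering the input again.
--     domains = sorted({r.get("domain", "other") for r in results})[:5]
--     body = []
--     for domain in domains:
--         matching = [r for r in results if r.get("domain", "other") == domain]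
--         body.append(f"**{domain}**")
--         for r in matching[:3]:
--             body.append(f"- {r.get('title', 'Untitled')}")
--         body.append("")
--     return "\n".join(header + body)
-- ===== Notes on version B (the rewrite author's own statement) =====
-- stated objective: alternative
-- what changed: Replaces the hash-grouping dict (build by_domain, then sort its items) with a sorted set of distinct domains and a per-domain filter pass over the original list, so no grouping structure is ever built.
import Mathlib
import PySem

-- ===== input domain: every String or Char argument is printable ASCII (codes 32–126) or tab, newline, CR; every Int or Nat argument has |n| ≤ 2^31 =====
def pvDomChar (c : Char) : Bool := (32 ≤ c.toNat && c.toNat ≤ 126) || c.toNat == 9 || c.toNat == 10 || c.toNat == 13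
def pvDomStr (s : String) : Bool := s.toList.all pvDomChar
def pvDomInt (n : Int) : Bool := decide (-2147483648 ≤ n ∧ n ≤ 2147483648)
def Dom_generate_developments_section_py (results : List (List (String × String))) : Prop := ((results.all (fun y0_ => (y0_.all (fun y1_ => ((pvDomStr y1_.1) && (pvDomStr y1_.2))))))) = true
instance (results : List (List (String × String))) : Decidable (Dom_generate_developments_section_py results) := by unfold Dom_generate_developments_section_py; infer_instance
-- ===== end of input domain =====

-- B replaces A's hash-grouping dict + item sort with a sorted set of distinct domains plus a
-- per-domain filter pass over the input (objective: alternative decomposition, same return value).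


-- shared helper: r.get(k, dflt) on a Python dict passed as an association list
def pvGet (r : List (String × String)) (k dflt : String) : String :=
  (PySem.Dict.mk r).getD k dflt

-- ===== PORT A =====
-- Note: Python sorts by_domain.items() as tuples; since dict keys are unique the comparison
-- never reaches the (unorderable) value lists, so sorting by the first component is exact.
def generate_developments_section_py (results : List (List (String × String))) : String :=
  let lines : List String :=
    ["### Recent Regulatory Developments", "",
     "The following recent developments have been identified:", ""]
  let by_domain : PySem.Dict String (List (List (String × String))) :=
    results.foldl (fun d result =>
      let domain := pvGet result "domain" "other"
      let d := if d.contains domain then d else d.insert domain []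
      d.insert domain (d.getD domain [] ++ [result])) PySem.Dict.empty
  let lines :=
    (PySem.List.slice (PySem.List.sorted by_domain.items (fun p => p.1)) none (some 5)).foldl
      (fun lines p =>
        let lines := lines ++ ["**" ++ p.1 ++ "**"]
        let lines := (PySem.List.slice p.2 none (some 3)).foldl
          (fun lines r => lines ++ ["- " ++ pvGet r "title" "Untitled"]) lines
        lines ++ [""]) lines
  PySem.Str.join "\n" lines

-- ===== PORT B =====
def generate_developments_section_py_alt (results : List (List (String × String))) : String :=
  let header : List String :=
    ["### Recent Regulatory Developments", "",
     "The following recent developments have been identified:", ""]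
  let domains :=
    PySem.List.slice
      (PySem.List.sorted
        (PySem.Set.ofList (results.map (fun r => pvGet r "domain" "other"))) (fun x => x))
      none (some 5)
  let body := domains.foldl (fun body domain =>
    let matching := results.filter (fun r => pvGet r "domain" "other" == domain)
    let body := body ++ ["**" ++ domain ++ "**"]
    let body := (PySem.List.slice matching none (some 3)).foldl
      (fun body r => body ++ ["- " ++ pvGet r "title" "Untitled"]) body
    body ++ [""]) []
  PySem.Str.join "\n" (header ++ body)

-- ===== PRECONDITION & SPEC =====
def Spec_generate_developments_section_py (results : List (List (String × String))) (out : String) : Prop := out = generate_developments_section_py_alt results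
instance (results : List (List (String × String))) (out : String) : Decidable (Spec_generate_developments_section_py results out) := by unfold Spec_generate_developments_section_py; infer_instance

-- ===== CLAIM (what is proved, stated in full; the proofs are below) =====
def Claim_equal_generate_developments_section_py : Prop := ∀ (results : List (List (String × String))), Dom_generate_developments_section_py results → Spec_generate_developments_section_py results (generate_developments_section_py results)

-- ===== LEMMAS AND PROOFS =====
def pvKey (r : List (String × String)) : String := pvGet r "domain" "other"

def pvHeader : List String :=
  ["### Recent Regulatory Developments", "",
   "The following recent developments have been identified:", ""]

def pvSortedKeys (results : List (List (String × String))) : List String :=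
  (PySem.List.sorted (PySem.Set.ofList (results.map pvKey)) (fun x => x)).take 5

def pvG (results : List (List (String × String))) (c : String) : List String :=
  ("**" ++ c ++ "**") ::
    (((results.filter (fun r => pvKey r == c)).take 3).map
      (fun r => "- " ++ pvGet r "title" "Untitled") ++ [""])

-- one step of A's grouping loop is a single Dict.modify
theorem pv_step_eq (d : PySem.Dict String (List (List (String × String))))
    (r : List (String × String)) :
    (let domain := pvGet r "domain" "other"
     let d' := if d.contains domain then d else d.insert domain []
     d'.insert domain (d'.getD domain [] ++ [r]))
    = d.modify (pvKey r) [] (· ++ [r]) := by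
  show _ = _
  simp only [pvKey]
  by_cases h : d.contains (pvGet r "domain" "other")
  · simp [h, PySem.Dict.modify]
  · simp only [h, PySem.Dict.modify]
    rw [PySem.Dict.getD_of_not_contains d [] (by simp [h])]
    simp [PySem.Dict.insert_insert_self]

theorem pv_foldl_app {α : Type} (f : α → String) (l : List α) (acc : List String) :
    l.foldl (fun a x => a ++ [f x]) acc = acc ++ l.map f := by
  induction l generalizing acc with
  | nil => simp
  | cons x t ih => simp [ih]

-- the grouping dict looks up to a filter of the input
theorem pv_getD_eq (results : List (List (String × String))) (c : String) :
    (results.foldl (fun d r => d.modify (pvKey r) [] (· ++ [r])) PySem.Dict.empty).getD c []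
      = results.filter (fun r => pvKey r == c) := by
  have h1 : results.foldl (fun d r => d.modify (pvKey r) [] (· ++ [r])) PySem.Dict.empty
      = (results.map (fun r => (pvKey r, r))).foldl
          (fun d p => d.modify p.1 [] (· ++ [p.2])) PySem.Dict.empty := by
    rw [List.foldl_map]
  rw [h1, PySem.Dict.getD_foldl_modify_append]
  simp [List.filter_map, Function.comp_def, List.map_map]

-- sorted items of the grouping dict = sorted distinct domains, paired with their filters
theorem pv_sorted_items (results : List (List (String × String))) :
    PySem.List.sorted
      (results.foldl (fun d r => d.modify (pvKey r) [] (· ++ [r])) PySem.Dict.empty).items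
      (fun p => p.1)
    = (PySem.List.sorted (PySem.Set.ofList (results.map pvKey)) (fun x => x)).map
        (fun c => (c, results.filter (fun r => pvKey r == c))) := by
  set D := results.foldl (fun d r => d.modify (pvKey r) [] (· ++ [r])) PySem.Dict.empty with hD
  have hkeys : D.keys = PySem.Set.ofList (results.map pvKey) := by
    rw [hD, PySem.Dict.keys_foldl_modify_key results pvKey [] (fun _ r v => v ++ [r])]
    rfl
  have hnd : D.keys.Nodup := by
    rw [hD]
    exact PySem.Dict.nodup_keys_foldl_modify_key _ _ _ _ _ (by simp [PySem.Dict.keys_empty])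
  have hitems : D.items = (PySem.Set.ofList (results.map pvKey)).map
      (fun c => (c, results.filter (fun r => pvKey r == c))) := by
    rw [PySem.Dict.items_eq_map_keys D hnd [], hkeys]
    exact List.map_congr_left (fun k _ => by rw [hD, pv_getD_eq])
  apply PySem.List.sorted_eq_of_perm_of_pairwise_lt
  · rw [hitems]
    exact (PySem.List.sorted_perm _ _ _).map _
  · exact List.pairwise_map.mpr
      (by simpa using PySem.List.sorted_ofList_pairwise_lt (results.map pvKey))

theorem pv_outer {α : Type} (g1 : List String → α → List String) (g : α → List String)
    (hg : ∀ acc x, g1 acc x = acc ++ g x) (l : List α) (acc : List String) :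
    l.foldl g1 acc = acc ++ l.flatMap g := by
  induction l generalizing acc with
  | nil => simp
  | cons x t ih => rw [List.foldl_cons, ih, hg, List.flatMap_cons, List.append_assoc]

theorem pv_outerA {α : Type} (g1 : List String → α → List String) (g : α → List String)
    (hg : ∀ acc x, g1 acc x = acc ++ g x) (l l' : List α) (hl : l = l') (acc : List String) :
    PySem.Str.join "\n" (l.foldl g1 acc) = PySem.Str.join "\n" (acc ++ l'.flatMap g) := by
  rw [pv_outer g1 g hg, hl]

theorem pv_outerB {α : Type} (g1 : List String → α → List String) (g : α → List String)
    (hg : ∀ acc x, g1 acc x = acc ++ g x) (l l' : List α) (hl : l = l') (acc : List String) :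
    PySem.Str.join "\n" (acc ++ l.foldl g1 []) = PySem.Str.join "\n" (acc ++ l'.flatMap g) := by
  rw [pv_outer g1 g hg, hl]
  simp

theorem pv_foldA_eq (results : List (List (String × String))) :
    results.foldl (fun d result =>
      let domain := pvGet result "domain" "other"
      let d := if d.contains domain then d else d.insert domain []
      d.insert domain (d.getD domain [] ++ [result])) PySem.Dict.empty
    = results.foldl (fun d r => d.modify (pvKey r) [] (· ++ [r])) PySem.Dict.empty := by
  have h : (fun (d : PySem.Dict String (List (List (String × String)))) result =>
      let domain := pvGet result "domain" "other"
      let d := if d.contains domain then d else d.insert domain []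
      d.insert domain (d.getD domain [] ++ [result]))
      = fun d r => d.modify (pvKey r) [] (· ++ [r]) :=
    funext fun d => funext fun r => pv_step_eq d r
  rw [h]

theorem pvA_eq (results : List (List (String × String))) :
    generate_developments_section_py results
      = PySem.Str.join "\n" (pvHeader ++ (pvSortedKeys results).flatMap (pvG results)) := by
  simp only [generate_developments_section_py]
  rw [pv_foldA_eq, pv_sorted_items,
    PySem.List.slice_to _ (by norm_num : (0:Int) ≤ 5), ← List.map_take, List.foldl_map]
  refine pv_outerA _ (pvG results) ?_ _ _ (by unfold pvSortedKeys; simp) _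
  intro acc c
  show List.foldl (fun l r => l ++ ["- " ++ pvGet r "title" "Untitled"])
      (acc ++ ["**" ++ c ++ "**"])
      (PySem.List.slice (List.filter (fun r => pvKey r == c) results) none (some 3)) ++ [""]
    = acc ++ pvG results c
  rw [PySem.List.slice_to _ (by norm_num : (0:Int) ≤ 3), pv_foldl_app]
  simp [pvG, List.append_assoc]

theorem pvB_eq (results : List (List (String × String))) :
    generate_developments_section_py_alt results
      = PySem.Str.join "\n" (pvHeader ++ (pvSortedKeys results).flatMap (pvG results)) := by
  simp only [generate_developments_section_py_alt]
  rw [PySem.List.slice_to _ (by norm_num : (0:Int) ≤ 5)]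
  refine pv_outerB _ (pvG results) ?_ _ _ (by unfold pvSortedKeys pvKey; simp) _
  intro acc c
  rw [PySem.List.slice_to _ (by norm_num : (0:Int) ≤ 3), pv_foldl_app]
  simp [pvG, pvKey, List.append_assoc]

-- ===== VERDICT (by name: the statement is the Claim_ definition above) =====
theorem generate_developments_section_py_spec : Claim_equal_generate_developments_section_py := by
  intro results _
  show _ = _
  rw [pvA_eq, pvB_eq]
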